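-- pv_equiv track=rewrite | github.com/talvola/generic_poker | tools/generate_rankings/generate_ne_seven_card_high_hand_rankings.py | _batch_combinations
-- ===== SOURCE A (Python) =====
-- import itertools
--
-- def _batch_combinations(items, r, batch_size=1000):
--     """Process combinations in batches to avoid memory issues."""
--     batch = []
--     for combo in itertools.combinations(items, r):
--         batch.append(combo)
--         if len(batch) >= batch_size:
--             yield batch
--             batch = []
--
--     if batch:
--         yield batch
-- ===== SOURCE B (Python) =====
-- import itertools
--
-- def _batch_combinations(items, r, batch_size=1000):
--     """Process combinations in batches to avoid memory issues."""
--     it = itertools.combinations(items, r)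
--     while batch := list(itertools.islice(it, batch_size)):
--         yield batch
-- ===== Notes on version B (the rewrite author's own statement) =====
-- stated objective: idiomatic
-- what changed: B consumes a single combinations iterator in fixed-size chunks with itertools.islice (the standard 'batched' recipe) instead of A's per-element accumulator with a flush test and a trailing yield; Pre_ excludes negative r, where A raises ValueError, and non-positive batch_size, a degenerate parameter on which A's size-1 batches are an accident of its flush test and B's islice naturally yields nothing (0) or raises (negative).
-- outside the precondition, e.g. on _batch_combinations([1, 2], 1, 0): A returns [[(1,)], [(2,)]], B returns []; on _batch_combinations([1], 1, -1): A returns [[(1,)]], B raises ValueError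
import Mathlib
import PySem

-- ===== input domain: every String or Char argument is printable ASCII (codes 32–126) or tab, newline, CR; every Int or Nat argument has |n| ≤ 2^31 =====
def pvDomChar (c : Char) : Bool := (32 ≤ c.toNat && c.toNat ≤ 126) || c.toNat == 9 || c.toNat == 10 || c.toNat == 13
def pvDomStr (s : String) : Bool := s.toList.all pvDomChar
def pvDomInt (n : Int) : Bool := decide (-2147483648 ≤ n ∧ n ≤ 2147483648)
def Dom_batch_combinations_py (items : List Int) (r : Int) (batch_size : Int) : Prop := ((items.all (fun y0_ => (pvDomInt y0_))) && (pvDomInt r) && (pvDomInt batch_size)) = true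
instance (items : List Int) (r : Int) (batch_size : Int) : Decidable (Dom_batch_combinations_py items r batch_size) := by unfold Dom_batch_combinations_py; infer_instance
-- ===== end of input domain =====

-- B pulls fixed-size chunks from one combinations iterator (the standard islice
-- "batched" recipe) instead of A's per-element accumulator with flush test (idiomatic; same cost).

-- itertools.combinations(items, r), in Python's lexicographic order
-- (shared library call of both Pythons, ported once)
def pyCombinations (items : List Int) (r : Nat) : List (List Int) :=
  match items, r with
  | _, 0 => [[]]
  | [], _ + 1 => []
  | x :: xs, n + 1 => (pyCombinations xs n).map (fun c => x :: c) ++ pyCombinations xs (n + 1)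
  termination_by items.length

-- ===== PORT A =====
def batch_combinations_py (items : List Int) (r : Int) (batch_size : Int) : List (List (List Int)) :=
  let res := (pyCombinations items r.toNat).foldl
      (fun (st : List (List (List Int)) × List (List Int)) combo =>
        let batch := st.2 ++ [combo]
        if batch_size ≤ (batch.length : Int) then (st.1 ++ [batch], ([] : List (List Int)))
        else (st.1, batch))
      ([], [])
  if res.2 ≠ [] then res.1 ++ [res.2] else res.1

-- ===== PORT B =====
-- `list(islice(it, n))` on a list-backed iterator = take n / advance by drop n;
-- the while loop is this recursion (negative batch_size raises in Python: outside Pre_)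
def pyChunkLoop (n : Nat) (l : List (List Int)) : List (List (List Int)) :=
  let batch := l.take n
  if h : batch = [] then []
  else batch :: pyChunkLoop n (l.drop n)
  termination_by l.length
  decreasing_by
    simp only [batch, List.take_eq_nil_iff, not_or] at h
    
    simp only [List.length_drop]
    cases l with
    | nil => exact absurd rfl h.2
    | cons a t => have : n ≠ 0 := h.1; simp; omega

def batch_combinations_py_alt (items : List Int) (r : Int) (batch_size : Int) : List (List (List Int)) :=
  pyChunkLoop batch_size.toNat (pyCombinations items r.toNat)

-- ===== PRECONDITION & SPEC =====
-- Pre_ excludes negative r, on which Python's itertools.combinations raises ValueError,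
-- and non-positive batch_size, a degenerate parameter on which A's size-1 batches are an
-- accident of its flush test and B's islice naturally yields nothing (0) or raises (negative).
def Pre_batch_combinations_py (items : List Int) (r : Int) (batch_size : Int) : Prop := 0 ≤ r ∧ 1 ≤ batch_size
instance (items : List Int) (r : Int) (batch_size : Int) : Decidable (Pre_batch_combinations_py items r batch_size) := by unfold Pre_batch_combinations_py; infer_instance
def pvWitness_batch_combinations_py : List Int × Int × Int := ([1, 2, 3], 2, 2)

def Spec_batch_combinations_py (items : List Int) (r : Int) (batch_size : Int) (out : List (List (List Int))) : Prop := out = batch_combinations_py_alt items r batch_size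
instance (items : List Int) (r : Int) (batch_size : Int) (out : List (List (List Int))) : Decidable (Spec_batch_combinations_py items r batch_size out) := by unfold Spec_batch_combinations_py; infer_instance

-- ===== CLAIM (what is proved, stated in full; the proofs are below) =====
def Claim_equal_batch_combinations_py : Prop := ∀ (items : List Int) (r : Int) (batch_size : Int), Dom_batch_combinations_py items r batch_size → Pre_batch_combinations_py items r batch_size → Spec_batch_combinations_py items r batch_size (batch_combinations_py items r batch_size)

-- ===== LEMMAS AND PROOFS =====

-- abstract chunking of a list into groups of m: both sides compute this
def pvChunks (m : Nat) : List (List Int) → List (List (List Int))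
  | [] => []
  | x :: xs => (x :: xs.take (m - 1)) :: pvChunks m (xs.drop (m - 1))
  termination_by l => l.length
  decreasing_by simp only [List.length_cons, List.length_drop]; omega

theorem pvChunks_nil (m : Nat) : pvChunks m [] = [] := by rw [pvChunks.eq_def]

theorem pvChunks_cons (m : Nat) (x : List Int) (xs : List (List Int)) :
    pvChunks m (x :: xs) = (x :: xs.take (m - 1)) :: pvChunks m (xs.drop (m - 1)) := by
  rw [pvChunks.eq_def]

theorem pvChunks_eq (m : Nat) (hm : 1 ≤ m) (l : List (List Int)) (hl : l ≠ []) :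
    pvChunks m l = l.take m :: pvChunks m (l.drop m) := by
  match l with
  | [] => exact absurd rfl hl
  | x :: xs =>
    rw [pvChunks_cons]
    obtain ⟨m', rfl⟩ : ∃ m', m = m' + 1 := ⟨m - 1, by omega⟩
    simp

def pvStep (bs : Int) (st : List (List (List Int)) × List (List Int)) (combo : List Int) :
    List (List (List Int)) × List (List Int) :=
  let batch := st.2 ++ [combo]
  if bs ≤ (batch.length : Int) then (st.1 ++ [batch], ([] : List (List Int))) else (st.1, batch)

def pvFinish (res : List (List (List Int)) × List (List Int)) : List (List (List Int)) :=
  if res.2 ≠ [] then res.1 ++ [res.2] else res.1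

-- A's loop with a partial batch of length < m appends the chunking of the rest
theorem lemA (bs : Int) (m : Nat) (hm : 1 ≤ m)
    (hcond : ∀ k : Nat, (bs ≤ ((k : Int) + 1)) ↔ m ≤ k + 1) :
    ∀ (cs : List (List Int)) (out : List (List (List Int))) (batch : List (List Int)),
      batch.length < m →
      pvFinish (cs.foldl (pvStep bs) (out, batch)) = out ++ pvChunks m (batch ++ cs) := by
  intro cs
  induction cs with
  | nil =>
    intro out batch hb
    simp only [List.foldl_nil, List.append_nil, pvFinish]
    by_cases h : batch = []
    · subst h; simp [pvChunks_nil]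
    · simp only [h, ne_eq, not_false_iff, if_pos]
      rw [pvChunks_eq m hm batch h]
      have h1 : batch.take m = batch := List.take_of_length_le (by omega)
      have h2 : batch.drop m = [] := List.drop_eq_nil_of_le (by omega)
      simp [h1, h2, pvChunks_nil]
  | cons c cs' ih =>
    intro out batch hb
    simp only [List.foldl_cons]
    have hlen : ((batch ++ [c]).length : Int) = (batch.length : Int) + 1 := by simp
    by_cases hf : bs ≤ ((batch.length : Int) + 1)
    · -- flush: batch ++ [c] has length exactly m
      have hm' : m ≤ batch.length + 1 := (hcond batch.length).mp hf
      have hlenm : (batch ++ [c]).length = m := by simp; omega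
      have hstep : pvStep bs (out, batch) c = (out ++ [batch ++ [c]], []) := by
        simp only [pvStep]
        rw [if_pos (by rw [hlen]; exact hf)]
      rw [hstep, ih (out ++ [batch ++ [c]]) [] (by simpa using hm)]
      rw [pvChunks_eq m hm (batch ++ c :: cs') (by simp)]
      have hsplit : batch ++ c :: cs' = (batch ++ [c]) ++ cs' := by simp
      have e1 : (batch ++ c :: cs').take m = batch ++ [c] := by
        rw [hsplit, ← hlenm, List.take_left]
      have e2 : (batch ++ c :: cs').drop m = cs' := by
        rw [hsplit, ← hlenm, List.drop_left]
      simp [e1, e2]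
    · -- keep accumulating
      have hstep : pvStep bs (out, batch) c = (out, batch ++ [c]) := by
        simp only [pvStep]
        rw [if_neg (by rw [hlen]; exact hf)]
      have hm' : ¬ m ≤ batch.length + 1 := fun h => hf ((hcond batch.length).mpr h)
      rw [hstep, ih out (batch ++ [c]) (by simp; omega)]
      simp

-- B's islice loop computes the same chunking
theorem lemB (n : Nat) (hn : 1 ≤ n) :
    ∀ (k : Nat) (l : List (List Int)), l.length ≤ k → pyChunkLoop n l = pvChunks n l := by
  intro k
  induction k with
  | zero =>
    intro l hk
    have : l = [] := List.eq_nil_of_length_eq_zero (by omega)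
    subst this
    rw [pyChunkLoop]
    simp [pvChunks_nil]
  | succ k ih =>
    intro l hk
    cases l with
    | nil => rw [pyChunkLoop]; simp [pvChunks_nil]
    | cons x xs =>
      rw [pyChunkLoop]
      have hne : (x :: xs).take n ≠ [] := by
        simp [List.take_eq_nil_iff]
        omega
      simp only [hne, dite_false]
      rw [ih ((x :: xs).drop n) (by simp only [List.length_drop, List.length_cons] at hk ⊢; omega)]
      rw [pvChunks_eq n hn (x :: xs) (by simp)]

-- ===== VERDICT (by name: the statement is the Claim_ definition above) =====
theorem batch_combinations_py_spec : Claim_equal_batch_combinations_py := by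
  intro items r batch_size _ hpre
  unfold Spec_batch_combinations_py
  obtain ⟨hr, hbs⟩ := hpre
  show pvFinish ((pyCombinations items r.toNat).foldl (pvStep batch_size) ([], []))
      = batch_combinations_py_alt items r batch_size
  unfold batch_combinations_py_alt
  set m : Nat := batch_size.toNat with hmdef
  have hm : 1 ≤ m := by omega
  have hcond : ∀ k : Nat, (batch_size ≤ ((k : Int) + 1)) ↔ m ≤ k + 1 := by
    intro k; omega
  rw [lemB m hm (pyCombinations items r.toNat).length (pyCombinations items r.toNat) le_rfl]
  have := lemA batch_size m hm hcond (pyCombinations items r.toNat) [] []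
      (by simp only [List.length_nil]; omega)
  simpa using this
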